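-- pv_equiv track=rewrite | github.com/NivKonst/Actively-Secure-Vector-OLE | Vector_OLE.py | fix_row_by_cols_permutation
-- ===== SOURCE A (Python) =====
-- def fix_row_by_cols_permutation(row,data,cols_permutation_transpose):
--     row_len=len(row);
--     #if row_len==0:
--     #    return (current_row,current_data);
--     permutated_row=[cols_permutation_transpose[x] for x in row];
--     if permutated_row==row:
--         return (row,data);
--     row_data_tuple_list=[(x,y) for x,y in zip(permutated_row,data)];
--     row_data_tuple_list.sort(key=lambda x: x[0]);
--     sorted_permutated_row=[x[0] for x in row_data_tuple_list];
--     sorted_permutated_data=[x[1] for x in row_data_tuple_list];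
--     return (sorted_permutated_row,sorted_permutated_data);
-- ===== SOURCE B (Python) =====
-- def fix_row_by_cols_permutation(row, data, cols_permutation_transpose):
--     permutated_row = [cols_permutation_transpose[x] for x in row]
--     if permutated_row == row:
--         return (row, data)
--     groups = {}
--     for k, v in zip(permutated_row, data):
--         groups.setdefault(k, []).append(v)
--     sorted_permutated_row = []
--     sorted_permutated_data = []
--     for k in sorted(groups):
--         bucket = groups[k]
--         sorted_permutated_row += [k] * len(bucket)
--         sorted_permutated_data += bucket
--     return (sorted_permutated_row, sorted_permutated_data)
-- ===== Notes on version B (the rewrite author's own statement) =====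
-- stated objective: alternative
-- what changed: B never sorts the n (value, data) pairs: it groups data into per-key buckets in one dict pass and emits the buckets in order of the sorted distinct keys, relying on bucket insertion order for stability instead of a stable sort of all pairs.
import Mathlib
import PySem

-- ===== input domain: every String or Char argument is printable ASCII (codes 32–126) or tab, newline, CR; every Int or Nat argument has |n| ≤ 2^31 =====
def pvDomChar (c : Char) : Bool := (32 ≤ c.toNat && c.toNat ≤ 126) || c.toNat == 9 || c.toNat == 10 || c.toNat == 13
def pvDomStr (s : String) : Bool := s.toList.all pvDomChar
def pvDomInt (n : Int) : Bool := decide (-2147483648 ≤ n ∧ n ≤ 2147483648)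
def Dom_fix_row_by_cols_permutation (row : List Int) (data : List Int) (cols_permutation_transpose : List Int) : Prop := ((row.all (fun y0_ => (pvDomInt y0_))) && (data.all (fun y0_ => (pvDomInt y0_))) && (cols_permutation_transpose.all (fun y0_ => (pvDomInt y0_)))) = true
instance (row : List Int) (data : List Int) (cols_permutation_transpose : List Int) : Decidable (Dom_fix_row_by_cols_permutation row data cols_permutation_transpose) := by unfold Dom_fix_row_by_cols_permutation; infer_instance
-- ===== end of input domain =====

-- B replaces A's sort of all n (value, data) pairs by bucket grouping: a dict of data-buckets keyed by
-- permuted value, then the buckets emitted in order of the sorted DISTINCT keys (alternative decomposition).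

-- ===== PORT A =====
def fix_row_by_cols_permutation (row : List Int) (data : List Int) (cols_permutation_transpose : List Int) : List Int × List Int :=
  let permutated_row := row.map (fun x => PySem.List.pyGetD cols_permutation_transpose x 0)
  if permutated_row = row then (row, data)
  else
    let row_data_tuple_list := permutated_row.zip data
    let sorted_list := PySem.List.sorted row_data_tuple_list (fun p => p.1)
    (sorted_list.map Prod.fst, sorted_list.map Prod.snd)

-- ===== PORT B =====
def fix_row_by_cols_permutation_alt (row : List Int) (data : List Int) (cols_permutation_transpose : List Int) : List Int × List Int :=
  let permutated_row := row.map (fun x => PySem.List.pyGetD cols_permutation_transpose x 0)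
  if permutated_row = row then (row, data)
  else
    let groups := (permutated_row.zip data).foldl
      (fun d p => d.modify p.1 [] (fun b => b ++ [p.2])) PySem.Dict.empty
    let ks := PySem.List.sorted groups.keys (fun k => k)
    ks.foldl (fun acc k =>
      let bucket := groups.getD k []
      (acc.1 ++ PySem.List.pyRepeat [k] (bucket.length : Int), acc.2 ++ bucket)) ([], [])

-- ===== PRECONDITION & SPEC =====
-- Pre_ excludes exactly the inputs where Python raises IndexError: some element of row is out of range as an index into cols_permutation_transpose.
def Pre_fix_row_by_cols_permutation (row : List Int) (_data : List Int) (cols_permutation_transpose : List Int) : Prop :=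
  ∀ x ∈ row, PySem.Raise.InRange cols_permutation_transpose.length x
instance (row : List Int) (data : List Int) (cols_permutation_transpose : List Int) : Decidable (Pre_fix_row_by_cols_permutation row data cols_permutation_transpose) := by unfold Pre_fix_row_by_cols_permutation; infer_instance
def pvWitness_fix_row_by_cols_permutation : List Int × List Int × List Int := ([0, 1], [5, 6], [1, 0])
def Spec_fix_row_by_cols_permutation (row : List Int) (data : List Int) (cols_permutation_transpose : List Int) (out : List Int × List Int) : Prop := out = fix_row_by_cols_permutation_alt row data cols_permutation_transpose
instance (row : List Int) (data : List Int) (cols_permutation_transpose : List Int) (out : List Int × List Int) : Decidable (Spec_fix_row_by_cols_permutation row data cols_permutation_transpose out) := by unfold Spec_fix_row_by_cols_permutation; infer_instance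

-- ===== CLAIM (what is proved, stated in full; the proofs are below) =====
def Claim_equal_fix_row_by_cols_permutation : Prop := ∀ (row : List Int) (data : List Int) (cols_permutation_transpose : List Int), Dom_fix_row_by_cols_permutation row data cols_permutation_transpose → Pre_fix_row_by_cols_permutation row data cols_permutation_transpose → Spec_fix_row_by_cols_permutation row data cols_permutation_transpose (fix_row_by_cols_permutation row data cols_permutation_transpose)

-- ===== LEMMAS AND PROOFS =====

-- inserting into an already key-ordered list is sorting with the element appended
theorem insertBy_eq_sorted_append (x : Int × Int) (acc : List (Int × Int))
    (h : acc.Pairwise (fun a b => a.1 ≤ b.1)) :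
    PySem.List.insertBy (fun a b => decide (a.1 < b.1)) x acc
      = PySem.List.sorted (acc ++ [x]) (fun p => p.1) := by
  rw [PySem.List.sorted_eq_foldl_insertBy, List.foldl_append,
    ← PySem.List.sorted_eq_foldl_insertBy,
    PySem.List.sorted_eq_self_of_pairwise _ _ h]
  rfl

-- stability of one insertion: within one key class c, an inserted element lands at the end
theorem filter_insertBy (c : Int) (x : Int × Int) (acc : List (Int × Int))
    (h : acc.Pairwise (fun a b => a.1 ≤ b.1)) :
    (PySem.List.insertBy (fun a b => decide (a.1 < b.1)) x acc).filter (fun y => y.1 == c)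
      = acc.filter (fun y => y.1 == c) ++ (if x.1 == c then [x] else []) := by
  induction acc with
  | nil =>
    by_cases hc : (x.1 == c) = true
    · simp [PySem.List.insertBy, List.filter, hc]
    · simp [PySem.List.insertBy, List.filter, hc]
  | cons y ys ih =>
    have hy : ∀ z ∈ ys, y.1 ≤ z.1 := fun z hz => (List.pairwise_cons.mp h).1 z hz
    have hys := (List.pairwise_cons.mp h).2
    simp only [PySem.List.insertBy]
    by_cases hlt : (decide (x.1 < y.1)) = true
    · rw [if_pos hlt]
      simp only [decide_eq_true_eq] at hlt
      by_cases hc : (x.1 == c) = true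
      · have hxc : x.1 = c := by simpa using hc
        have h0 : (y :: ys).filter (fun z => z.1 == c) = [] := by
          rw [List.filter_eq_nil_iff]
          intro z hz
          rcases List.mem_cons.mp hz with rfl | hz'
          · simp; omega
          · have := hy z hz'; simp; omega
        rw [List.filter_cons_of_pos (by simpa using hc), h0, if_pos hc, List.nil_append]
      · rw [List.filter_cons_of_neg (by simpa using hc), if_neg hc, List.append_nil]
    · rw [if_neg hlt]
      by_cases hyc : (y.1 == c) = true
      · rw [List.filter_cons_of_pos (by simpa using hyc), ih hys,
          List.filter_cons_of_pos (by simpa using hyc), List.cons_append]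
      · rw [List.filter_cons_of_neg (by simpa using hyc), ih hys,
          List.filter_cons_of_neg (by simpa using hyc)]

-- stability of the whole insertion sort: filtering one key class commutes with sorting
theorem filter_sorted_foldl (c : Int) (l acc : List (Int × Int))
    (h : acc.Pairwise (fun a b => a.1 ≤ b.1)) :
    (l.foldl (fun acc x => PySem.List.insertBy (fun a b => decide (a.1 < b.1)) x acc) acc).filter
        (fun y => y.1 == c)
      = acc.filter (fun y => y.1 == c) ++ l.filter (fun y => y.1 == c) := by
  induction l generalizing acc with
  | nil => simp
  | cons x xs ih =>
    simp only [List.foldl_cons]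
    have hacc' : (PySem.List.insertBy (fun a b => decide (a.1 < b.1)) x acc).Pairwise
        (fun a b => a.1 ≤ b.1) := by
      rw [insertBy_eq_sorted_append x acc h]
      exact PySem.List.sorted_pairwise _ _
    rw [ih _ hacc', filter_insertBy c x acc h, List.filter_cons]
    by_cases hc : x.1 == c <;> simp [hc]

theorem filter_sorted (c : Int) (l : List (Int × Int)) :
    (PySem.List.sorted l (fun p => p.1)).filter (fun y => y.1 == c)
      = l.filter (fun y => y.1 == c) := by
  rw [PySem.List.sorted_eq_foldl_insertBy]
  simpa using filter_sorted_foldl c l [] (by simp)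

-- a key-ordered list whose keys are all ≥ c splits as (key = c block) ++ (key ≠ c rest)
theorem sorted_split_head (c : Int) (s : List (Int × Int))
    (hs : s.Pairwise (fun a b => a.1 ≤ b.1)) (hlb : ∀ x ∈ s, c ≤ x.1) :
    s = s.filter (fun x => x.1 == c) ++ s.filter (fun x => !(x.1 == c)) := by
  induction s with
  | nil => simp
  | cons x xs ih =>
    have hx : ∀ z ∈ xs, x.1 ≤ z.1 := fun z hz => (List.pairwise_cons.mp hs).1 z hz
    have hxs := (List.pairwise_cons.mp hs).2
    by_cases hc : x.1 == c
    · have := ih hxs (fun z hz => hlb z (by simp [hz]))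
      simp only [List.filter_cons, hc]
      simpa using this
    · have hxgt : c < x.1 := lt_of_le_of_ne (hlb x (by simp)) (by simpa using Ne.symm (by simpa using hc))
      have hnone : (x :: xs).filter (fun z => z.1 == c) = [] := by
        rw [List.filter_eq_nil_iff]
        intro z hz
        rcases List.mem_cons.mp hz with rfl | hz'
        · simp; omega
        · have := hx z hz'; simp; omega
      have hall : (x :: xs).filter (fun z => !(z.1 == c)) = x :: xs := by
        rw [List.filter_eq_self]
        intro z hz
        rw [List.filter_eq_nil_iff] at hnone
        simpa using hnone z hz
      rw [hnone, hall, List.nil_append]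

-- partition of a key-ordered list along a strictly increasing key list covering all its keys
theorem sorted_partition (ks : List Int) (s : List (Int × Int))
    (hs : s.Pairwise (fun a b => a.1 ≤ b.1)) (hks : ks.Pairwise (· < ·))
    (hcov : ∀ x ∈ s, x.1 ∈ ks) :
    s = ks.flatMap (fun k => s.filter (fun x => x.1 == k)) := by
  induction ks generalizing s with
  | nil =>
    rcases s with _ | ⟨x, xs⟩
    · simp
    · exact absurd (hcov x (by simp)) (by simp)
  | cons k ks' ih =>
    have hk : ∀ k' ∈ ks', k < k' := fun k' h => (List.pairwise_cons.mp hks).1 k' h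
    have hks' := (List.pairwise_cons.mp hks).2
    have hlb : ∀ x ∈ s, k ≤ x.1 := by
      intro x hx
      rcases List.mem_cons.mp (hcov x hx) with h | h
      · omega
      · exact le_of_lt (hk _ h)
    set t := s.filter (fun x => !(x.1 == k)) with ht
    have htp : t.Pairwise (fun a b => a.1 ≤ b.1) := hs.sublist (List.filter_sublist ..)
    have htcov : ∀ x ∈ t, x.1 ∈ ks' := by
      intro x hx
      have hmem := List.mem_of_mem_filter hx
      have hne : ¬(x.1 == k) = true := by
        have := List.of_mem_filter hx; simpa using this
      rcases List.mem_cons.mp (hcov x hmem) with h | h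
      · exact absurd (by simpa using h) (by simpa using hne)
      · exact h
    have hfeq : ∀ k' ∈ ks', t.filter (fun x => x.1 == k') = s.filter (fun x => x.1 == k') := by
      intro k' hk'
      rw [ht, List.filter_filter]
      apply List.filter_congr
      intro x _
      have : k ≠ k' := by have := hk k' hk'; omega
      by_cases h : x.1 = k'
      · simp [h]; omega
      · simp [h]
    have hrec := ih t htp hks' htcov
    rw [List.flatMap_cons]
    conv_lhs => rw [sorted_split_head k s hs hlb]
    congr 1
    rw [← ht, hrec]
    exact (List.flatMap_congr (fun k' hk' => (hfeq k' hk').symm)).symm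

-- the filtered key class, projected to keys, is constant
theorem filter_map_fst (c : Int) (l : List (Int × Int)) :
    (l.filter (fun p => p.1 == c)).map Prod.fst
      = List.replicate (l.filter (fun p => p.1 == c)).length c := by
  rw [List.eq_replicate_iff]
  refine ⟨by simp, ?_⟩
  intro b hb
  rcases List.mem_map.mp hb with ⟨p, hp, rfl⟩
  simpa using List.of_mem_filter hp

-- ===== VERDICT (by name: the statement is the Claim_ definition above) =====
theorem fix_row_by_cols_permutation_spec : Claim_equal_fix_row_by_cols_permutation := by
  intro row data cpt _ _
  unfold Spec_fix_row_by_cols_permutation fix_row_by_cols_permutation fix_row_by_cols_permutation_alt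
  simp only
  split_ifs with h
  · rfl
  · set pr := row.map (fun x => PySem.List.pyGetD cpt x 0) with hpr
    set l := pr.zip data with hl
    set D := List.foldl (fun d p => d.modify p.1 [] fun b => b ++ [p.2]) PySem.Dict.empty l with hD
    -- B side: split fold, turn the appends into flatMaps
    rw [PySem.List.foldl_prod_mk
        (f := fun a k => a ++ PySem.List.pyRepeat [k] (((D.getD k []).length : Nat) : Int))
        (g := fun a k => a ++ D.getD k [])]
    rw [PySem.List.foldl_append_eq_flatMap, PySem.List.foldl_append_eq_flatMap]
    -- identify the keys and the buckets
    have hkeys : D.keys = PySem.Set.ofList (l.map Prod.fst) := by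
      rw [hD, PySem.Dict.keys_foldl_modify_key l Prod.fst [] (fun _ p b => b ++ [p.2])]
      simp [PySem.Set.update, PySem.Set.ofList_eq_foldl, PySem.Dict.keys_empty]
    have hbucket : ∀ k, D.getD k [] = (l.filter (fun p => p.1 == k)).map Prod.snd := by
      intro k
      rw [hD, PySem.Dict.getD_foldl_modify_append l PySem.Dict.empty k]
      simp [PySem.Dict.getD, PySem.Dict.get?, PySem.Dict.empty]
    -- A side: the stable sort is the partition along the sorted distinct keys
    have hmain : PySem.List.sorted l (fun p => p.1)
        = (PySem.List.sorted (PySem.Set.ofList (l.map Prod.fst)) (fun k => k)).flatMap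
            (fun k => l.filter (fun x => x.1 == k)) := by
      have h1 := sorted_partition (PySem.List.sorted (PySem.Set.ofList (l.map Prod.fst)) (fun k => k))
        (PySem.List.sorted l (fun p => p.1))
        (PySem.List.sorted_pairwise _ _)
        (PySem.List.sorted_ofList_pairwise_lt _)
        (by
          intro x hx
          rw [PySem.List.mem_sorted] at hx ⊢
          rw [PySem.Set.mem_ofList]
          exact List.mem_map_of_mem hx)
      rw [h1]
      exact List.flatMap_congr (fun k _ => filter_sorted k l)
    rw [hkeys, hmain]
    simp only [List.map_flatMap, List.nil_append]
    refine Prod.ext ?_ ?_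
    · apply List.flatMap_congr
      intro k _
      rw [hbucket k, filter_map_fst k l, PySem.List.pyRepeat_singleton]
      simp
    · exact List.flatMap_congr (fun k _ => (hbucket k).symm)
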